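-- pv_equiv track=rewrite | github.com/jestebanv30/image-recognition-python | convertidor_resultados_excel_estudiantes.py | calcular_porcentaje
-- ===== SOURCE A (Python) =====
-- def calcular_porcentaje(respuestas, rango, respuestas_correctas):
--     correctas = 0
--     incorrectas = 0
--     no_marcadas = 0
--     total_preguntas = 0
--     for num in rango:
--         str_num = str(num)
--         if respuestas_correctas.get(str_num) != 'Anulada':
--             if str_num in respuestas:
--                 total_preguntas += 1
--                 if respuestas[str_num] == 'No marcada':
--                     incorrectas += 1
--                     no_marcadas += 1
--                 elif respuestas[str_num] == respuestas_correctas[str_num]: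
--                     correctas += 1
--                 else:
--                     incorrectas += 1
--     return correctas, total_preguntas, no_marcadas
-- ===== SOURCE B (Python) =====
-- def calcular_porcentaje(respuestas, rango, respuestas_correctas):
--     relevantes = [str(num) for num in rango
--                   if respuestas_correctas.get(str(num)) != 'Anulada'
--                   and str(num) in respuestas]
--     total_preguntas = len(relevantes)
--     no_marcadas = sum(1 for k in relevantes if respuestas[k] == 'No marcada')
--     correctas = sum(1 for k in relevantes
--                     if respuestas[k] != 'No marcada'
--                     and respuestas[k] == respuestas_correctas.get(k))
--     return correctas, total_preguntas, no_marcadas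
-- ===== Notes on version B (the rewrite author's own statement) =====
-- stated objective: simpler
-- what changed: Replaces the single fused accumulator loop by first building the list of relevant question keys and then taking three separate counts over it, dropping the unused 'incorrectas' accumulator.
-- crash fix: On inputs where some in-range question has an answer other than 'No marcada' but its key is missing from respuestas_correctas, A raises KeyError; B returns the counts treating the missing correct answer as a non-match. — e.g. on calcular_porcentaje([("1", "X")], [1], []): A raises KeyError, B returns (0, 1, 0)
import Mathlib
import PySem

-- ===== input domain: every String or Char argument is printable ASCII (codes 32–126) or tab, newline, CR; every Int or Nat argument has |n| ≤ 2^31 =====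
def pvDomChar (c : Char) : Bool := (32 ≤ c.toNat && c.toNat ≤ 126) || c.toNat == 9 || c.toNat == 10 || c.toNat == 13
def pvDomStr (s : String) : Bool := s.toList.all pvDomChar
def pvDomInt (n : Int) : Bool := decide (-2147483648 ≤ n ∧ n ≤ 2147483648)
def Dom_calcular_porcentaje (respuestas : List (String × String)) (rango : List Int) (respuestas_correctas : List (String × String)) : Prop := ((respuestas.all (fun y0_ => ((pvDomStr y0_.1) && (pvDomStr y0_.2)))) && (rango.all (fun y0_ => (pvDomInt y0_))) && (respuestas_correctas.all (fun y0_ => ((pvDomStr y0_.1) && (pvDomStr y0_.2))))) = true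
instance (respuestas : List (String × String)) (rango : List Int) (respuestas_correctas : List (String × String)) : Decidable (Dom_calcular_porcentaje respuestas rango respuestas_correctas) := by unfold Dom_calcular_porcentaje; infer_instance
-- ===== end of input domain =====

-- ===== PORT A =====
-- B replaces A's fused accumulator loop by a prebuilt relevant-key list with three separate counts (simpler; drops the unused 'incorrectas' accumulator).
-- pvStep is A's loop body; state = (correctas, incorrectas, no_marcadas, total_preguntas)
def pvStep (respuestas respuestas_correctas : List (String × String)) (st : Int × Int × Int × Int) (num : Int) : Int × Int × Int × Int :=
  let str_num := PySem.Int.toStr num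
  if PySem.Dict.get? (PySem.Dict.mk respuestas_correctas) str_num ≠ some "Anulada" then
    if (PySem.Dict.get? (PySem.Dict.mk respuestas) str_num).isSome then
      let v := PySem.Dict.getD (PySem.Dict.mk respuestas) str_num ""
      if v = "No marcada" then
        (st.1, st.2.1 + 1, st.2.2.1 + 1, st.2.2.2 + 1)
      -- respuestas_correctas[str_num] raises when the key is missing; Pre_ excludes that case, so getD's default is never used under Pre_
      else if v = PySem.Dict.getD (PySem.Dict.mk respuestas_correctas) str_num "" then
        (st.1 + 1, st.2.1, st.2.2.1, st.2.2.2 + 1)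
      else
        (st.1, st.2.1 + 1, st.2.2.1, st.2.2.2 + 1)
    else st
  else st

def calcular_porcentaje (respuestas : List (String × String)) (rango : List Int) (respuestas_correctas : List (String × String)) : Int × Int × Int :=
  let s := rango.foldl (pvStep respuestas respuestas_correctas) (0, 0, 0, 0)
  (s.1, s.2.2.2, s.2.2.1)

-- ===== PORT B =====
-- the comprehension filter: not annulled and answered
def pvRelevante (respuestas respuestas_correctas : List (String × String)) (num : Int) : Bool :=
  decide (PySem.Dict.get? (PySem.Dict.mk respuestas_correctas) (PySem.Int.toStr num) ≠ some "Anulada" ∧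
          (PySem.Dict.get? (PySem.Dict.mk respuestas) (PySem.Int.toStr num)).isSome)
-- respuestas[k] == 'No marcada'
def pvEsNoMarcada (respuestas : List (String × String)) (k : String) : Bool :=
  decide (PySem.Dict.getD (PySem.Dict.mk respuestas) k "" = "No marcada")
-- respuestas[k] != 'No marcada' and respuestas[k] == respuestas_correctas.get(k)
def pvEsCorrecta (respuestas respuestas_correctas : List (String × String)) (k : String) : Bool :=
  decide (PySem.Dict.getD (PySem.Dict.mk respuestas) k "" ≠ "No marcada" ∧
          some (PySem.Dict.getD (PySem.Dict.mk respuestas) k "") =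
            PySem.Dict.get? (PySem.Dict.mk respuestas_correctas) k)

def calcular_porcentaje_alt (respuestas : List (String × String)) (rango : List Int) (respuestas_correctas : List (String × String)) : Int × Int × Int :=
  let relevantes := (rango.filter (pvRelevante respuestas respuestas_correctas)).map PySem.Int.toStr
  let total_preguntas : Int := relevantes.length
  let no_marcadas : Int := (relevantes.filter (pvEsNoMarcada respuestas)).length
  let correctas : Int := (relevantes.filter (pvEsCorrecta respuestas respuestas_correctas)).length
  (correctas, total_preguntas, no_marcadas)

-- ===== PRECONDITION & SPEC =====
-- Pre_ excludes exactly the inputs on which A raises KeyError: some num in rango that is not annulled,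
-- is answered with something other than 'No marcada', but whose key is missing from respuestas_correctas.
def Pre_calcular_porcentaje (respuestas : List (String × String)) (rango : List Int) (respuestas_correctas : List (String × String)) : Prop :=
  ∀ num ∈ rango,
    (PySem.Dict.get? (PySem.Dict.mk respuestas_correctas) (PySem.Int.toStr num) ≠ some "Anulada" ∧
     (PySem.Dict.get? (PySem.Dict.mk respuestas) (PySem.Int.toStr num)).isSome ∧
     PySem.Dict.getD (PySem.Dict.mk respuestas) (PySem.Int.toStr num) "" ≠ "No marcada") →
    (PySem.Dict.get? (PySem.Dict.mk respuestas_correctas) (PySem.Int.toStr num)).isSome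
instance (respuestas : List (String × String)) (rango : List Int) (respuestas_correctas : List (String × String)) : Decidable (Pre_calcular_porcentaje respuestas rango respuestas_correctas) := by unfold Pre_calcular_porcentaje; infer_instance
def pvWitness_calcular_porcentaje : (List (String × String)) × List Int × (List (String × String)) :=
  ([("1", "A"), ("2", "No marcada")], [1, 2, 3], [("1", "A"), ("2", "B")])

-- On inputs where some in-range question has an answer other than 'No marcada' but its key is missing from respuestas_correctas, A raises KeyError; B returns the counts treating the missing correct answer as a non-match.
def Raises_calcular_porcentaje (respuestas : List (String × String)) (rango : List Int) (respuestas_correctas : List (String × String)) : Prop :=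
  ∃ num ∈ rango,
    PySem.Dict.get? (PySem.Dict.mk respuestas_correctas) (PySem.Int.toStr num) ≠ some "Anulada" ∧
    (PySem.Dict.get? (PySem.Dict.mk respuestas) (PySem.Int.toStr num)).isSome ∧
    PySem.Dict.getD (PySem.Dict.mk respuestas) (PySem.Int.toStr num) "" ≠ "No marcada" ∧
    ¬ (PySem.Dict.get? (PySem.Dict.mk respuestas_correctas) (PySem.Int.toStr num)).isSome
instance (respuestas : List (String × String)) (rango : List Int) (respuestas_correctas : List (String × String)) : Decidable (Raises_calcular_porcentaje respuestas rango respuestas_correctas) := by unfold Raises_calcular_porcentaje; infer_instance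
def pvRaiseWitness_calcular_porcentaje : (List (String × String)) × List Int × (List (String × String)) :=
  ([("1", "X")], [1], [])
def pvRaiseWitnessOut_calcular_porcentaje : Int × Int × Int := (0, 1, 0)

def Spec_calcular_porcentaje (respuestas : List (String × String)) (rango : List Int) (respuestas_correctas : List (String × String)) (out : Int × Int × Int) : Prop := out = calcular_porcentaje_alt respuestas rango respuestas_correctas
instance (respuestas : List (String × String)) (rango : List Int) (respuestas_correctas : List (String × String)) (out : Int × Int × Int) : Decidable (Spec_calcular_porcentaje respuestas rango respuestas_correctas out) := by unfold Spec_calcular_porcentaje; infer_instance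

-- ===== CLAIM (what is proved, stated in full; the proofs are below) =====
def Claim_equal_calcular_porcentaje : Prop := ∀ (respuestas : List (String × String)) (rango : List Int) (respuestas_correctas : List (String × String)), Dom_calcular_porcentaje respuestas rango respuestas_correctas → Pre_calcular_porcentaje respuestas rango respuestas_correctas → Spec_calcular_porcentaje respuestas rango respuestas_correctas (calcular_porcentaje respuestas rango respuestas_correctas)
def Claim_raises_calcular_porcentaje : Prop := (∀ (respuestas : List (String × String)) (rango : List Int) (respuestas_correctas : List (String × String)), Dom_calcular_porcentaje respuestas rango respuestas_correctas → Raises_calcular_porcentaje respuestas rango respuestas_correctas → ¬ Pre_calcular_porcentaje respuestas rango respuestas_correctas) ∧ (Dom_calcular_porcentaje (pvRaiseWitness_calcular_porcentaje.1) (pvRaiseWitness_calcular_porcentaje.2.1) (pvRaiseWitness_calcular_porcentaje.2.2) ∧ Raises_calcular_porcentaje (pvRaiseWitness_calcular_porcentaje.1) (pvRaiseWitness_calcular_porcentaje.2.1) (pvRaiseWitness_calcular_porcentaje.2.2) ∧ calcular_porcentaje_alt (pvRaiseWitness_calcular_porcentaje.1) (pvRaiseWitness_calcular_porcentaje.2.1)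 (pvRaiseWitness_calcular_porcentaje.2.2) = pvRaiseWitnessOut_calcular_porcentaje)

-- ===== LEMMAS AND PROOFS =====

-- A's fold over any list, from any start accumulator, adds exactly B's three counts
-- (the unused 'incorrectas' component is existentially quantified away).
theorem pv_fold_eq (respuestas respuestas_correctas : List (String × String)) :
    ∀ (l : List Int), Pre_calcular_porcentaje respuestas l respuestas_correctas →
    ∀ (c i n t : Int), ∃ i',
      l.foldl (pvStep respuestas respuestas_correctas) (c, i, n, t) =
      (c + (((l.filter (pvRelevante respuestas respuestas_correctas)).map PySem.Int.toStr).filter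
              (pvEsCorrecta respuestas respuestas_correctas)).length,
       i',
       n + (((l.filter (pvRelevante respuestas respuestas_correctas)).map PySem.Int.toStr).filter
              (pvEsNoMarcada respuestas)).length,
       t + ((l.filter (pvRelevante respuestas respuestas_correctas)).map PySem.Int.toStr).length) := by
  intro l
  induction l with
  | nil => intro _ c i n t; exact ⟨i, by simp⟩
  | cons x xs ih =>
    intro hpre c i n t
    have hx := hpre x (List.mem_cons_self)
    have hxs : Pre_calcular_porcentaje respuestas xs respuestas_correctas :=
      fun num hm => hpre num (List.mem_cons_of_mem _ hm)
    rw [List.foldl_cons]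
    by_cases h1 : PySem.Dict.get? (PySem.Dict.mk respuestas_correctas) (PySem.Int.toStr x) ≠ some "Anulada"
    · by_cases h2 : (PySem.Dict.get? (PySem.Dict.mk respuestas) (PySem.Int.toStr x)).isSome
      · have hrel : pvRelevante respuestas respuestas_correctas x = true := by
          simp [pvRelevante, h1, h2]
        by_cases h3 : PySem.Dict.getD (PySem.Dict.mk respuestas) (PySem.Int.toStr x) "" = "No marcada"
        · -- 'No marcada' branch
          have hstep : pvStep respuestas respuestas_correctas (c, i, n, t) x = (c, i + 1, n + 1, t + 1) := by
            simp [pvStep, h1, h2, h3]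
          have hnm : pvEsNoMarcada respuestas (PySem.Int.toStr x) = true := by
            simp [pvEsNoMarcada, h3]
          have hco : ¬ pvEsCorrecta respuestas respuestas_correctas (PySem.Int.toStr x) = true := by
            simp [pvEsCorrecta, h3]
          obtain ⟨i', hfold⟩ := ih hxs c (i + 1) (n + 1) (t + 1)
          refine ⟨i', ?_⟩
          rw [hstep, hfold, List.filter_cons_of_pos hrel, List.map_cons,
              List.filter_cons_of_pos hnm, List.filter_cons_of_neg hco]
          simp only [Prod.mk.injEq, List.length_cons, true_and]
          push_cast; omega
        · -- marked answer: Pre_ guarantees the key exists in respuestas_correctas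
          have hk : (PySem.Dict.get? (PySem.Dict.mk respuestas_correctas) (PySem.Int.toStr x)).isSome :=
            hx ⟨h1, h2, h3⟩
          have hnm : ¬ pvEsNoMarcada respuestas (PySem.Int.toStr x) = true := by
            simp [pvEsNoMarcada, h3]
          by_cases h4 : PySem.Dict.getD (PySem.Dict.mk respuestas) (PySem.Int.toStr x) "" =
              PySem.Dict.getD (PySem.Dict.mk respuestas_correctas) (PySem.Int.toStr x) ""
          · have h5 : some (PySem.Dict.getD (PySem.Dict.mk respuestas) (PySem.Int.toStr x) "") =
                PySem.Dict.get? (PySem.Dict.mk respuestas_correctas) (PySem.Int.toStr x) := by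
              rw [h4]
              cases hg : PySem.Dict.get? (PySem.Dict.mk respuestas_correctas) (PySem.Int.toStr x) with
              | none => rw [hg] at hk; simp at hk
              | some v => simp [PySem.Dict.getD, hg]
            have h3' : ¬ PySem.Dict.getD (PySem.Dict.mk respuestas_correctas) (PySem.Int.toStr x) "" = "No marcada" := h4 ▸ h3
            have hstep : pvStep respuestas respuestas_correctas (c, i, n, t) x = (c + 1, i, n, t + 1) := by
              simp [pvStep, h1, h2, h3', h4]
            have hco : pvEsCorrecta respuestas respuestas_correctas (PySem.Int.toStr x) = true := by
              simp [pvEsCorrecta, h3, h5]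
            obtain ⟨i', hfold⟩ := ih hxs (c + 1) i n (t + 1)
            refine ⟨i', ?_⟩
            rw [hstep, hfold, List.filter_cons_of_pos hrel, List.map_cons,
                List.filter_cons_of_neg hnm, List.filter_cons_of_pos hco]
            simp only [Prod.mk.injEq, List.length_cons, true_and]
            push_cast; omega
          · have h5 : ¬ some (PySem.Dict.getD (PySem.Dict.mk respuestas) (PySem.Int.toStr x) "") =
                PySem.Dict.get? (PySem.Dict.mk respuestas_correctas) (PySem.Int.toStr x) := by
              cases hg : PySem.Dict.get? (PySem.Dict.mk respuestas_correctas) (PySem.Int.toStr x) with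
              | none => simp
              | some v =>
                simp only [Option.some.injEq]
                intro he
                exact h4 (he.trans (by simp [PySem.Dict.getD, hg]))
            have hstep : pvStep respuestas respuestas_correctas (c, i, n, t) x = (c, i + 1, n, t + 1) := by
              simp [pvStep, h1, h2, h3, h4]
            have hco : ¬ pvEsCorrecta respuestas respuestas_correctas (PySem.Int.toStr x) = true := by
              simp [pvEsCorrecta, h5]
            obtain ⟨i', hfold⟩ := ih hxs c (i + 1) n (t + 1)
            refine ⟨i', ?_⟩
            rw [hstep, hfold, List.filter_cons_of_pos hrel, List.map_cons,
                List.filter_cons_of_neg hnm, List.filter_cons_of_neg hco]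
            simp only [Prod.mk.injEq, List.length_cons, true_and]
            push_cast; omega
      · have hrel : ¬ pvRelevante respuestas respuestas_correctas x = true := by
          simp [pvRelevante, h2]
        have hstep : pvStep respuestas respuestas_correctas (c, i, n, t) x = (c, i, n, t) := by
          simp [pvStep, h1, h2]
        obtain ⟨i', hfold⟩ := ih hxs c i n t
        exact ⟨i', by rw [hstep, hfold, List.filter_cons_of_neg hrel]⟩
    · have hrel : ¬ pvRelevante respuestas respuestas_correctas x = true := by
        simp [pvRelevante, h1]
      have hstep : pvStep respuestas respuestas_correctas (c, i, n, t) x = (c, i, n, t) := by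
        simp [pvStep, h1]
      obtain ⟨i', hfold⟩ := ih hxs c i n t
      exact ⟨i', by rw [hstep, hfold, List.filter_cons_of_neg hrel]⟩

-- ===== VERDICT (by name: the statement is the Claim_ definition above) =====
theorem calcular_porcentaje_spec : Claim_equal_calcular_porcentaje := by
  intro respuestas rango respuestas_correctas _ hpre
  unfold Spec_calcular_porcentaje calcular_porcentaje calcular_porcentaje_alt
  obtain ⟨i', hfold⟩ := pv_fold_eq respuestas respuestas_correctas rango hpre 0 0 0 0
  rw [hfold]
  simp

def calcular_porcentaje_raises : Claim_raises_calcular_porcentaje := by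
  unfold Claim_raises_calcular_porcentaje
  refine ⟨?_, by decide⟩
  intro respuestas rango respuestas_correctas _ hr hpre
  obtain ⟨num, hm, hh1, hh2, hh3, hh4⟩ := hr
  exact hh4 (hpre num hm ⟨hh1, hh2, hh3⟩)
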